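-- pv_equiv track=rewrite | github.com/DM-Mulani-963/LOGify | cli/logify/db.py | _classify_log
-- ===== SOURCE A (Python) =====
-- def _classify_log(source: str, old_type: str = None):
--     """
--     Helper to classify a log based on its source path.
--     Returns (category, subcategory) tuple.
--     """
--     s = source.lower()
--
--     # Security logs
--     if any(x in s for x in ['auth.log', 'secure', 'faillog', 'btmp', 'ufw', 'fail2ban', 'audit', 'apparmor']):
--         if 'fail' in s or 'btmp' in s:
--             return ('Security', 'Failed Authentication')
--         elif 'ufw' in s or 'firewall' in s:
--             return ('Security', 'Firewall')
--         elif 'audit' in s: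
--             return ('Security', 'Policy Violations')
--         else:
--             return ('Security', 'Login Attempts')
--
--     # Administrator logs
--     elif any(x in s for x in ['nginx', 'apache', 'httpd', 'mysql', 'postgres', 'redis', 'mongodb', 'sudo']):
--         if 'nginx' in s or 'apache' in s or 'httpd' in s:
--             return ('Administrator', 'Web Server')
--         elif any(x in s for x in ['mysql', 'postgres', 'redis', 'mongodb']):
--             return ('Administrator', 'Database')
--         elif 'sudo' in s:
--             return ('Administrator', 'Root Actions')
--         else:
--             return ('Administrator', 'Application')
--
--     # User Activity logs
--     elif any(x in s for x in ['bash_history', 'zsh_history', 'fish_history', '.mozilla', 'chrome', 'chromium']):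
--         if 'history' in s and any(x in s for x in ['bash', 'zsh', 'fish']):
--             return ('User Activity', 'Shell History')
--         elif any(x in s for x in ['.mozilla', 'chrome', 'chromium']):
--             return ('User Activity', 'Browser History')
--         else:
--             return ('User Activity', 'Session')
--
--     # System logs (default)
--     else:
--         if 'kern' in s or 'dmesg' in s:
--             return ('System', 'System')
--         else:
--             return ('System', 'Other')
--
--     return ('System', 'System')
-- ===== SOURCE B (Python) =====
-- _GATE_PRIORITY = {
--     'auth.log': 0, 'secure': 0, 'faillog': 0, 'btmp': 0, 'ufw': 0,
--     'fail2ban': 0, 'audit': 0, 'apparmor': 0,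
--     'nginx': 1, 'apache': 1, 'httpd': 1, 'mysql': 1, 'postgres': 1,
--     'redis': 1, 'mongodb': 1, 'sudo': 1,
--     'bash_history': 2, 'zsh_history': 2, 'fish_history': 2,
--     '.mozilla': 2, 'chrome': 2, 'chromium': 2,
-- }
--
-- _EXTRA_KEYWORDS = ['fail', 'firewall', 'history', 'bash', 'zsh', 'fish', 'kern', 'dmesg']
--
-- _KEYWORDS = list(_GATE_PRIORITY) + _EXTRA_KEYWORDS
--
--
-- def _security_sub(hit):
--     if 'fail' in hit or 'btmp' in hit:
--         return 'Failed Authentication'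
--     if 'ufw' in hit or 'firewall' in hit:
--         return 'Firewall'
--     if 'audit' in hit:
--         return 'Policy Violations'
--     return 'Login Attempts'
--
--
-- def _admin_sub(hit):
--     if 'nginx' in hit or 'apache' in hit or 'httpd' in hit:
--         return 'Web Server'
--     if 'mysql' in hit or 'postgres' in hit or 'redis' in hit or 'mongodb' in hit:
--         return 'Database'
--     if 'sudo' in hit:
--         return 'Root Actions'
--     return 'Application'
--
--
-- def _user_sub(hit):
--     if 'history' in hit and ('bash' in hit or 'zsh' in hit or 'fish' in hit):
--         return 'Shell History'
--     if '.mozilla' in hit or 'chrome' in hit or 'chromium' in hit: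
--         return 'Browser History'
--     return 'Session'
--
--
-- def _classify_log(source, old_type=None):
--     """Classify a log path: one scan collects matched keywords, a priority
--     argmin over gate keywords picks the category, then a per-category helper
--     picks the subcategory from the matched-keyword set."""
--     s = source.lower()
--     hit = [k for k in _KEYWORDS if k in s]
--     pri = min((p for k, p in _GATE_PRIORITY.items() if k in hit), default=3)
--     if pri == 0:
--         return ('Security', _security_sub(hit))
--     if pri == 1:
--         return ('Administrator', _admin_sub(hit))
--     if pri == 2:
--         return ('User Activity', _user_sub(hit))
--     return ('System', 'System' if 'kern' in hit or 'dmesg' in hit else 'Other')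
-- ===== Notes on version B (the rewrite author's own statement) =====
-- stated objective: alternative
-- what changed: Instead of A's nested if/elif cascade that re-scans the path per keyword per branch, B scans the path once collecting the set of matched keywords, picks the category as the argmin of gate-keyword priorities over that set, and then a per-category helper reads the subcategory off the matched set.
import Mathlib
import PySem

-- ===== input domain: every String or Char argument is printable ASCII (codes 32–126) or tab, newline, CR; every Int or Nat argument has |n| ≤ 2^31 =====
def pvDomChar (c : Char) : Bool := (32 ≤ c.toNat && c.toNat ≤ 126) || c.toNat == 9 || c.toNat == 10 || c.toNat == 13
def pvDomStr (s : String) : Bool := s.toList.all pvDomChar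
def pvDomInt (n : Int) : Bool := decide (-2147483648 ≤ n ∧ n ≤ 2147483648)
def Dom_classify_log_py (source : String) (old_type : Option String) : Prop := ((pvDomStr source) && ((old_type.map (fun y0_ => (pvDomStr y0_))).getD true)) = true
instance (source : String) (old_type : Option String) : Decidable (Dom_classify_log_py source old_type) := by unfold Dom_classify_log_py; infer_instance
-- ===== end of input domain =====

-- B replaces A's nested if/elif cascade (which re-scans the path per keyword per branch) by one
-- keyword scan collecting the matched keywords, an argmin over gate-keyword priorities for the
-- category, and per-category helpers reading the subcategory off the matched set (objective:
-- alternative). old_type is unused in both, as in A.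

-- ===== PORT A =====
def classify_log_py (source : String) (old_type : Option String) : String × String :=
  let s := PySem.Str.lower source
  if ["auth.log", "secure", "faillog", "btmp", "ufw", "fail2ban", "audit", "apparmor"].any
      (fun x => PySem.Str.isIn x s) then
    if PySem.Str.isIn "fail" s || PySem.Str.isIn "btmp" s then ("Security", "Failed Authentication")
    else if PySem.Str.isIn "ufw" s || PySem.Str.isIn "firewall" s then ("Security", "Firewall")
    else if PySem.Str.isIn "audit" s then ("Security", "Policy Violations")
    else ("Security", "Login Attempts")
  else if ["nginx", "apache", "httpd", "mysql", "postgres", "redis", "mongodb", "sudo"].any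
      (fun x => PySem.Str.isIn x s) then
    if PySem.Str.isIn "nginx" s || PySem.Str.isIn "apache" s || PySem.Str.isIn "httpd" s then
      ("Administrator", "Web Server")
    else if ["mysql", "postgres", "redis", "mongodb"].any (fun x => PySem.Str.isIn x s) then
      ("Administrator", "Database")
    else if PySem.Str.isIn "sudo" s then ("Administrator", "Root Actions")
    else ("Administrator", "Application")
  else if ["bash_history", "zsh_history", "fish_history", ".mozilla", "chrome", "chromium"].any
      (fun x => PySem.Str.isIn x s) then
    if PySem.Str.isIn "history" s && ["bash", "zsh", "fish"].any (fun x => PySem.Str.isIn x s) then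
      ("User Activity", "Shell History")
    else if [".mozilla", "chrome", "chromium"].any (fun x => PySem.Str.isIn x s) then
      ("User Activity", "Browser History")
    else ("User Activity", "Session")
  else
    if PySem.Str.isIn "kern" s || PySem.Str.isIn "dmesg" s then ("System", "System")
    else ("System", "Other")

-- ===== PORT B =====
-- _GATE_PRIORITY: gate keyword → priority of its category (0 Security, 1 Administrator, 2 User Activity)
def pvGatePriority : List (String × Int) :=
  [("auth.log", 0), ("secure", 0), ("faillog", 0), ("btmp", 0), ("ufw", 0),
   ("fail2ban", 0), ("audit", 0), ("apparmor", 0),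
   ("nginx", 1), ("apache", 1), ("httpd", 1), ("mysql", 1), ("postgres", 1),
   ("redis", 1), ("mongodb", 1), ("sudo", 1),
   ("bash_history", 2), ("zsh_history", 2), ("fish_history", 2),
   (".mozilla", 2), ("chrome", 2), ("chromium", 2)]

def pvExtraKeywords : List String :=
  ["fail", "firewall", "history", "bash", "zsh", "fish", "kern", "dmesg"]

def pvKeywords : List String := pvGatePriority.map Prod.fst ++ pvExtraKeywords

def pvSecuritySub (hit : List String) : String :=
  if hit.contains "fail" || hit.contains "btmp" then "Failed Authentication"
  else if hit.contains "ufw" || hit.contains "firewall" then "Firewall"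
  else if hit.contains "audit" then "Policy Violations"
  else "Login Attempts"

def pvAdminSub (hit : List String) : String :=
  if hit.contains "nginx" || hit.contains "apache" || hit.contains "httpd" then "Web Server"
  else if hit.contains "mysql" || hit.contains "postgres" || hit.contains "redis" || hit.contains "mongodb" then "Database"
  else if hit.contains "sudo" then "Root Actions"
  else "Application"

def pvUserSub (hit : List String) : String :=
  if hit.contains "history" && (hit.contains "bash" || hit.contains "zsh" || hit.contains "fish") then "Shell History"
  else if hit.contains ".mozilla" || hit.contains "chrome" || hit.contains "chromium" then "Browser History"
  else "Session"

def classify_log_py_alt (source : String) (old_type : Option String) : String × String :=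
  let s := PySem.Str.lower source
  let hit := pvKeywords.filter (fun k => PySem.Str.isIn k s)
  let pri := PySem.List.minD
    (pvGatePriority.filterMap (fun kp => if hit.contains kp.1 then some kp.2 else none))
    (fun p => p) 3
  if pri == 0 then ("Security", pvSecuritySub hit)
  else if pri == 1 then ("Administrator", pvAdminSub hit)
  else if pri == 2 then ("User Activity", pvUserSub hit)
  else ("System", if hit.contains "kern" || hit.contains "dmesg" then "System" else "Other")

-- ===== PRECONDITION & SPEC =====
def Spec_classify_log_py (source : String) (old_type : Option String) (out : String × String) : Prop := out = classify_log_py_alt source old_type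
instance (source : String) (old_type : Option String) (out : String × String) : Decidable (Spec_classify_log_py source old_type out) := by unfold Spec_classify_log_py; infer_instance

-- ===== CLAIM (what is proved, stated in full; the proofs are below) =====
def Claim_equal_classify_log_py : Prop := ∀ (source : String) (old_type : Option String), Dom_classify_log_py source old_type → Spec_classify_log_py source old_type (classify_log_py source old_type)

-- ===== LEMMAS AND PROOFS =====

-- the matched-keyword list of B, and the matched gate-priority list its argmin ranges over
def pvHits (s : String) : List String := pvKeywords.filter (fun k => PySem.Str.isIn k s)
def pvL (s : String) : List Int :=
  pvGatePriority.filterMap (fun kp => if (pvHits s).contains kp.1 then some kp.2 else none)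

lemma hits_contains (s k : String) :
    (pvHits s).contains k = (pvKeywords.contains k && PySem.Str.isIn k s) := by
  by_cases h : k ∈ pvKeywords <;> by_cases h2 : PySem.Str.isIn k s <;>
    simp [pvHits, List.mem_filter, *]

lemma hits_contains_true (s k : String) (hk : pvKeywords.contains k = true) :
    (pvHits s).contains k = PySem.Str.isIn k s := by
  rw [hits_contains, hk]; simp

lemma pv_minD_eq (l : List Int) (m d : Int) (hm : m ∈ l) (hle : ∀ x ∈ l, m ≤ x) :
    PySem.List.minD l (fun x => x) d = m := by
  unfold PySem.List.minD
  rcases h : PySem.List.min? l (fun x => x) with _ | m'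
  · rw [(PySem.List.min?_eq_none_iff l _).mp h] at hm; simp at hm
  · have h1 := PySem.List.min?_mem h
    have h2 := PySem.List.min?_isMin h m hm
    have h3 := hle m' h1
    simp; omega

lemma mem_pvL (s k : String) (p : Int) (hk : (k, p) ∈ pvGatePriority)
    (hb : PySem.Str.isIn k s = true) : p ∈ pvL s := by
  have hkw : k ∈ pvKeywords :=
    List.mem_append_left _ (List.mem_map.mpr ⟨(k, p), hk, rfl⟩)
  have hc : (pvHits s).contains k = true := by
    rw [hits_contains, hb]; simp [hkw]
  exact List.mem_filterMap.mpr ⟨(k, p), hk, by simp at hc ⊢; simp [hc]⟩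

lemma mem_pvL_elim (s : String) (x : Int) (hx : x ∈ pvL s) :
    ∃ kp ∈ pvGatePriority, PySem.Str.isIn kp.1 s = true ∧ x = kp.2 := by
  rcases List.mem_filterMap.mp hx with ⟨kp, hkp, hf⟩
  split at hf
  · next hc =>
      rw [hits_contains] at hc
      simp only [Bool.and_eq_true] at hc
      exact ⟨kp, hkp, hc.2, by injection hf with h; omega⟩
  · exact absurd hf (by simp)

-- kp.2 classifies kp.1 into its gate group (a closed fact about the literal table)
lemma gate_groups : ∀ kp ∈ pvGatePriority,
    (kp.2 = 0 ∧ kp.1 ∈ ["auth.log", "secure", "faillog", "btmp", "ufw", "fail2ban", "audit", "apparmor"]) ∨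
    (kp.2 = 1 ∧ kp.1 ∈ ["nginx", "apache", "httpd", "mysql", "postgres", "redis", "mongodb", "sudo"]) ∨
    (kp.2 = 2 ∧ kp.1 ∈ ["bash_history", "zsh_history", "fish_history", ".mozilla", "chrome", "chromium"]) := by
  decide

lemma pri_eval (s : String) :
    PySem.List.minD (pvL s) (fun p => p) 3 =
      (if ["auth.log", "secure", "faillog", "btmp", "ufw", "fail2ban", "audit", "apparmor"].any
          (fun x => PySem.Str.isIn x s) then 0
       else if ["nginx", "apache", "httpd", "mysql", "postgres", "redis", "mongodb", "sudo"].any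
          (fun x => PySem.Str.isIn x s) then 1
       else if ["bash_history", "zsh_history", "fish_history", ".mozilla", "chrome", "chromium"].any
          (fun x => PySem.Str.isIn x s) then 2
       else 3) := by
  by_cases h0 : (["auth.log", "secure", "faillog", "btmp", "ufw", "fail2ban", "audit", "apparmor"].any
      (fun x => PySem.Str.isIn x s)) = true
  · rw [if_pos h0]
    rcases List.any_eq_true.mp h0 with ⟨x, hx, hb⟩
    refine pv_minD_eq _ _ _ ?_ ?_
    · fin_cases hx <;> exact mem_pvL s _ 0 (by decide) hb
    · intro y hy
      rcases mem_pvL_elim s y hy with ⟨kp, hkp, _, rfl⟩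
      rcases gate_groups kp hkp with ⟨h, _⟩ | ⟨h, _⟩ | ⟨h, _⟩ <;> omega
  · rw [if_neg h0]
    rw [Bool.not_eq_true] at h0
    have hall0 := List.any_eq_false.mp h0
    by_cases h1 : (["nginx", "apache", "httpd", "mysql", "postgres", "redis", "mongodb", "sudo"].any
        (fun x => PySem.Str.isIn x s)) = true
    · rw [if_pos h1]
      rcases List.any_eq_true.mp h1 with ⟨x, hx, hb⟩
      refine pv_minD_eq _ _ _ ?_ ?_
      · fin_cases hx <;> exact mem_pvL s _ 1 (by decide) hb
      · intro y hy
        rcases mem_pvL_elim s y hy with ⟨kp, hkp, hbk, rfl⟩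
        rcases gate_groups kp hkp with ⟨h, hg⟩ | ⟨h, _⟩ | ⟨h, _⟩
        · exact absurd hbk (by simpa using hall0 kp.1 hg)
        · omega
        · omega
    · rw [if_neg h1]
      rw [Bool.not_eq_true] at h1
      have hall1 := List.any_eq_false.mp h1
      by_cases h2 : (["bash_history", "zsh_history", "fish_history", ".mozilla", "chrome", "chromium"].any
          (fun x => PySem.Str.isIn x s)) = true
      · rw [if_pos h2]
        rcases List.any_eq_true.mp h2 with ⟨x, hx, hb⟩
        refine pv_minD_eq _ _ _ ?_ ?_
        · fin_cases hx <;> exact mem_pvL s _ 2 (by decide) hb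
        · intro y hy
          rcases mem_pvL_elim s y hy with ⟨kp, hkp, hbk, rfl⟩
          rcases gate_groups kp hkp with ⟨h, hg⟩ | ⟨h, hg⟩ | ⟨h, _⟩
          · exact absurd hbk (by simpa using hall0 kp.1 hg)
          · exact absurd hbk (by simpa using hall1 kp.1 hg)
          · omega
      · rw [if_neg h2]
        rw [Bool.not_eq_true] at h2
        have hall2 := List.any_eq_false.mp h2
        have hnil : pvL s = [] := by
          rw [List.eq_nil_iff_forall_not_mem]
          intro y hy
          rcases mem_pvL_elim s y hy with ⟨kp, hkp, hbk, rfl⟩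
          rcases gate_groups kp hkp with ⟨_, hg⟩ | ⟨_, hg⟩ | ⟨_, hg⟩
          · exact absurd hbk (by simpa using hall0 kp.1 hg)
          · exact absurd hbk (by simpa using hall1 kp.1 hg)
          · exact absurd hbk (by simpa using hall2 kp.1 hg)
        rw [hnil]; rfl

-- ===== VERDICT (by name: the statement is the Claim_ definition above) =====
theorem classify_log_py_spec : Claim_equal_classify_log_py := by
  intro source old_type _
  unfold Spec_classify_log_py classify_log_py classify_log_py_alt
  simp only []
  generalize PySem.Str.lower source = s
  rw [show (pvGatePriority.filterMap fun kp =>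
        if (pvKeywords.filter fun k => PySem.Str.isIn k s).contains kp.1 then some kp.2 else none) =
      pvL s from rfl]
  rw [show (pvKeywords.filter fun k => PySem.Str.isIn k s) = pvHits s from rfl]
  rw [pri_eval s]
  by_cases h0 : (["auth.log", "secure", "faillog", "btmp", "ufw", "fail2ban", "audit", "apparmor"].any
      (fun x => PySem.Str.isIn x s)) = true
  · simp only [if_pos h0]
    rw [if_pos (by decide : (((0 : Int) == 0) = true))]
    simp only [pvSecuritySub,
      hits_contains_true s "fail" (by decide), hits_contains_true s "btmp" (by decide),
      hits_contains_true s "ufw" (by decide), hits_contains_true s "firewall" (by decide),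
      hits_contains_true s "audit" (by decide)]
    split_ifs <;> rfl
  · simp only [if_neg h0]
    by_cases h1 : (["nginx", "apache", "httpd", "mysql", "postgres", "redis", "mongodb", "sudo"].any
        (fun x => PySem.Str.isIn x s)) = true
    · simp only [if_pos h1]
      rw [if_neg (by decide : ¬(((1 : Int) == 0) = true)),
          if_pos (by decide : (((1 : Int) == 1) = true))]
      simp only [pvAdminSub,
        hits_contains_true s "nginx" (by decide), hits_contains_true s "apache" (by decide),
        hits_contains_true s "httpd" (by decide), hits_contains_true s "mysql" (by decide),
        hits_contains_true s "postgres" (by decide), hits_contains_true s "redis" (by decide),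
        hits_contains_true s "mongodb" (by decide), hits_contains_true s "sudo" (by decide),
        List.any_cons, List.any_nil, Bool.or_false, Bool.or_assoc]
      split_ifs <;> rfl
    · simp only [if_neg h1]
      by_cases h2 : (["bash_history", "zsh_history", "fish_history", ".mozilla", "chrome", "chromium"].any
          (fun x => PySem.Str.isIn x s)) = true
      · simp only [if_pos h2]
        rw [if_neg (by decide : ¬(((2 : Int) == 0) = true)),
            if_neg (by decide : ¬(((2 : Int) == 1) = true)),
            if_pos (by decide : (((2 : Int) == 2) = true))]
        simp only [pvUserSub,
          hits_contains_true s "history" (by decide), hits_contains_true s "bash" (by decide),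
          hits_contains_true s "zsh" (by decide), hits_contains_true s "fish" (by decide),
          hits_contains_true s ".mozilla" (by decide), hits_contains_true s "chrome" (by decide),
          hits_contains_true s "chromium" (by decide),
          List.any_cons, List.any_nil, Bool.or_false, Bool.or_assoc]
        split_ifs <;> rfl
      · simp only [if_neg h2]
        rw [if_neg (by decide : ¬(((3 : Int) == 0) = true)),
            if_neg (by decide : ¬(((3 : Int) == 1) = true)),
            if_neg (by decide : ¬(((3 : Int) == 2) = true))]
        simp only [hits_contains_true s "kern" (by decide), hits_contains_true s "dmesg" (by decide)]
        split_ifs <;> rfl
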